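-- pv_equiv track=rewrite | github.com/blegloannec/CodeProblems | Kattis/hillnumbers.py | is_hill
-- ===== SOURCE A (Python) =====
-- def is_hill(N):
--     up = True
--     for i in range(1,len(N)):
--         if up and N[i-1]>N[i]:
--             up = False
--         elif not up and N[i-1]<N[i]:
--             return False
--     return True
-- ===== SOURCE B (Python) =====
-- def is_hill(N):
--     steps = [1 if a < b else -1 for a, b in zip(N, N[1:]) if a != b]
--     return steps == sorted(steps, reverse=True)
-- ===== Notes on version B (the rewrite author's own statement) =====
-- stated objective: alternative
-- what changed: Replaced A's single-pass flag state machine by a sort-based characterization: collect the strict adjacent step directions (+1 up, -1 down, ties dropped) and return whether that list equals its own stable descending sort, i.e. all ups precede all downs.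
import Mathlib
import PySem

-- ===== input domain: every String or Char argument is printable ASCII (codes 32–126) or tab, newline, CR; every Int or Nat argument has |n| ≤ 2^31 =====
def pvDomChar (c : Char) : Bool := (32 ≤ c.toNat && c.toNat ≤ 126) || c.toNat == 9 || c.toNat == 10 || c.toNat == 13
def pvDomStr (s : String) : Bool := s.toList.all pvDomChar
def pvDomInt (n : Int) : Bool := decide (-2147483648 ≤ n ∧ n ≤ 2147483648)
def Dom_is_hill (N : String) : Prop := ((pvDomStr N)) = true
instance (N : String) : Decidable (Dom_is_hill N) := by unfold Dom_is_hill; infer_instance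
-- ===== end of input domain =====

-- B replaces A's flag state machine by a sort-based test on the list of strict step directions; same result, not faster.

-- ===== PORT A =====
-- A's for-loop over i in range(1, len(N)) with the 'up' flag, ported as the obvious
-- structural recursion walking the adjacent pairs (N[i-1], N[i]) with the same flag state.
def is_hill_go : List Char → Bool → Bool
  | a :: b :: rest, up =>
      if up && decide (b < a) then is_hill_go (b :: rest) false
      else if !up && decide (a < b) then false
      else is_hill_go (b :: rest) up
  | _, _ => true

def is_hill (N : String) : Bool := is_hill_go N.toList true

-- ===== PORT B =====
-- the comprehension: strict step directions over zip(N, N[1:]), ties filtered out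
def is_hill_step (p : Char × Char) : Option Int :=
  if p.1 ≠ p.2 then some (if p.1 < p.2 then 1 else -1) else none

def is_hill_alt (N : String) : Bool :=
  let cs := N.toList
  let steps : List Int := (cs.zip cs.tail).filterMap is_hill_step
  decide (steps = PySem.List.sorted steps (fun x => x) true)

-- ===== PRECONDITION & SPEC =====
def Spec_is_hill (N : String) (out : Bool) : Prop := out = is_hill_alt N
instance (N : String) (out : Bool) : Decidable (Spec_is_hill N out) := by unfold Spec_is_hill; infer_instance

-- ===== CLAIM (what is proved, stated in full; the proofs are below) =====
def Claim_equal_is_hill : Prop := ∀ (N : String), Dom_is_hill N → Spec_is_hill N (is_hill N)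

-- ===== LEMMAS AND PROOFS =====
-- the step list of a char list
def hillSteps (l : List Char) : List Int := (l.zip l.tail).filterMap is_hill_step

theorem hillSteps_cons (a b : Char) (r : List Char) :
    hillSteps (a :: b :: r) =
      (if a ≠ b then (if a < b then (1:Int) else -1) :: hillSteps (b :: r) else hillSteps (b :: r)) := by
  simp only [hillSteps, List.tail, List.zip, List.zipWith, List.filterMap, is_hill_step]
  split_ifs <;> simp_all

theorem hillSteps_mem (l : List Char) (x : Int) (hx : x ∈ hillSteps l) : x = 1 ∨ x = -1 := by
  simp only [hillSteps, List.mem_filterMap, is_hill_step] at hx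
  obtain ⟨p, _, hp⟩ := hx
  split_ifs at hp <;> simp_all

-- once the flag is down, A accepts iff no further strict up step exists
theorem is_hill_go_false (l : List Char) :
    is_hill_go l false = decide (∀ x ∈ hillSteps l, x = -1) := by
  induction l with
  | nil => simp [is_hill_go, hillSteps]
  | cons a t ih =>
      cases t with
      | nil => simp [is_hill_go, hillSteps]
      | cons b r =>
          rw [hillSteps_cons]
          simp only [is_hill_go, Bool.false_and, Bool.not_false, Bool.true_and]
          by_cases hab : a = b
          · simp [hab, ih]
          · by_cases hlt : a < b
            · simp [hab, hlt]
            · simp [hab, hlt, ih]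

-- while the flag is up, A accepts iff the step list is non-increasing
theorem is_hill_go_true (l : List Char) :
    is_hill_go l true = decide ((hillSteps l).Pairwise (fun x y => y ≤ x)) := by
  induction l with
  | nil => simp [is_hill_go, hillSteps]
  | cons a t ih =>
      cases t with
      | nil => simp [is_hill_go, hillSteps]
      | cons b r =>
          rw [hillSteps_cons]
          simp only [is_hill_go, Bool.true_and, Bool.not_true, Bool.false_and]
          by_cases hab : a = b
          · simp [hab, ih]
          · by_cases hdown : b < a
            · have hnlt : ¬ a < b := not_lt.mpr hdown.le
              rw [if_pos (by simp [hdown]), is_hill_go_false]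
              simp only [hab, hnlt, ne_eq, not_false_iff, if_true,
                List.pairwise_cons, decide_eq_decide]
              constructor
              · intro h
                refine ⟨fun x hx => by have := h x hx; omega, ?_⟩
                exact List.pairwise_of_forall_mem_list
                  (fun x hx y hy => by have := h x hx; have := h y hy; omega)
              · rintro ⟨hall, _⟩ x hx
                rcases hillSteps_mem _ _ hx with h1 | h1
                · have h2 := hall x hx; rw [h1] at h2; norm_num at h2
                · exact h1
            · have hup : a < b := lt_of_le_of_ne (not_lt.mp hdown) hab
              rw [if_neg (by simp [hdown])]
              simp only [hab, hup, ne_eq, not_false_iff, if_true, ih,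
                Bool.false_eq_true, if_neg, List.pairwise_cons, decide_eq_decide]
              constructor
              · intro h
                exact ⟨fun x hx => by rcases hillSteps_mem _ _ hx with h1 | h1 <;> omega, h⟩
              · rintro ⟨_, h⟩; exact h

-- a list equals its own stable descending sort iff it is non-increasing
theorem sorted_rev_self_iff (l : List Int) :
    (l = PySem.List.sorted l (fun x => x) true) ↔ l.Pairwise (fun x y => y ≤ x) := by
  constructor
  · intro h
    rw [h]
    exact PySem.List.sorted_pairwise_rev l (fun x => x)
  · intro h
    exact (PySem.List.sorted_rev_eq_self_of_pairwise l (fun x => x) h).symm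

-- ===== VERDICT (by name: the statement is the Claim_ definition above) =====
theorem is_hill_spec : Claim_equal_is_hill := by
  intro N _
  unfold Spec_is_hill is_hill is_hill_alt
  rw [is_hill_go_true]
  simp only [decide_eq_decide]
  exact (sorted_rev_self_iff _).symm
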